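-- pv_equiv track=rewrite | github.com/MrRoboto11102003/Quantization_project | experiment1.py | _compute_layer_flops
-- ===== SOURCE A (Python) =====
-- def _compute_layer_flops(num_blocks):
--     # Initial conv
--     flops = [3 * 16 * 9 * 32 * 32]
--     cfg = [(32, 16, 16, num_blocks[0]), (16, 32, 32, num_blocks[1]), (8, 64, 64, num_blocks[2])]
--     prev_c = 16
--     for h, c_out, _, n in cfg:
--         for i in range(n):
--             c_in = prev_c if i == 0 else c_out
--             block_f = c_in * c_out * 9 * h * h + c_out * c_out * 9 * h * h
--             if c_in != c_out:
--                 block_f += c_in * c_out * 1 * h * h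
--             flops.append(block_f)
--         prev_c = c_out
--     return flops
-- ===== SOURCE B (Python) =====
-- def _compute_layer_flops(num_blocks):
--     # Flat enumeration: prefix-sum block starts, then one cost() per global block index.
--     starts = [0]
--     for n in num_blocks[:3]:
--         starts.append(starts[-1] + max(n, 0))
--
--     def cost(k):
--         s = max(j for j in range(3) if starts[j] <= k)
--         h = [32, 16, 8][s]
--         c_out = [16, 32, 64][s]
--         prev = [16, 16, 32][s]
--         c_in = prev if k == starts[s] else c_out
--         f = (c_in + c_out) * c_out * 9 * h * h
--         if c_in != c_out:
--             f += c_in * c_out * h * h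
--         return f
--
--     return [3 * 16 * 9 * 32 * 32] + [cost(k) for k in range(starts[3])]
-- ===== Notes on version B (the rewrite author's own statement) =====
-- stated objective: alternative
-- what changed: Replaces A's nested stage/block loops carrying prev_c state with a flat enumeration: prefix sums of block counts give each stage's start index, and a single comprehension over all global block indices computes each cost by table lookup of its stage (found via the prefix-sum starts) and a first-block test k == starts[s].
import Mathlib
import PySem

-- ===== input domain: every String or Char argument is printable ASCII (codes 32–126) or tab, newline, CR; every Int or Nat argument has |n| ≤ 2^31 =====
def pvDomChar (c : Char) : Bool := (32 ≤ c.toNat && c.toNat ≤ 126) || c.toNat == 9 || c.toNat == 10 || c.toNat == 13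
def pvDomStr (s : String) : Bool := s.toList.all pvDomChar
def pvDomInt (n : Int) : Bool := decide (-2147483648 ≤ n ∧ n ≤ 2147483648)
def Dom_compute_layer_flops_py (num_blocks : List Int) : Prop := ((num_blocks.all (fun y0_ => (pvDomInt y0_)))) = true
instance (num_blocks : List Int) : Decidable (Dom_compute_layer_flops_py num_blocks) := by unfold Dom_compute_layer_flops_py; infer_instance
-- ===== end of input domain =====

-- B replaces A's nested stage/block loops carrying prev_c by a flat enumeration: prefix-sum
-- block starts, then one table-lookup cost per global block index; objective: alternative.

-- ===== PORT A =====
-- Literal transliteration of A: list of flops, cfg list, outer loop over cfg carrying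
-- (flops, prev_c), inner loop over range(n) appending block_f. The fallback branch is
-- num_blocks[0..2] raising IndexError (excluded by Pre_).
def compute_layer_flops_py (num_blocks : List Int) : List Int :=
  -- num_blocks[0], num_blocks[1], num_blocks[2]: defined iff the list has ≥ 3 elements (else IndexError)
  match num_blocks with
  | n0 :: n1 :: n2 :: _ =>
    let flops : List Int := [3 * 16 * 9 * 32 * 32]
    let cfg : List (Int × Int × Int × Int) := [(32, 16, 16, n0), (16, 32, 32, n1), (8, 64, 64, n2)]
    let res := cfg.foldl (fun (st : List Int × Int) hc =>
      let h := hc.1; let c_out := hc.2.1; let n := hc.2.2.2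
      let fl := (PySem.List.pyRange 0 n 1).foldl (fun fl i =>
        let c_in := if i == 0 then st.2 else c_out
        let block_f := c_in * c_out * 9 * h * h + c_out * c_out * 9 * h * h
        let block_f := if c_in ≠ c_out then block_f + c_in * c_out * 1 * h * h else block_f
        fl ++ [block_f]) st.1
      (fl, c_out)) (flops, 16)
    res.1
  | _ => []  -- IndexError in Python; outside Pre_

-- ===== PORT B =====
-- cost(k) of Source B: stage s = max j in range(3) with starts[j] <= k, then table lookups.
-- Python's max over the generator never raises here (starts[0] = 0 ≤ k for every k range
-- produces) and starts[j] never raises under Pre_; the .getD 0 defaults are unreachable.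
def pvCost (starts : List Int) (k : Int) : Int :=
  let s := ((PySem.List.max? ((PySem.List.pyRange 0 3 1).filter
              (fun j => (PySem.List.pyGet? starts j).getD 0 ≤ k)) (fun x => x)).getD 0)
  let h := (PySem.List.pyGet? ([32, 16, 8] : List Int) s).getD 0
  let c_out := (PySem.List.pyGet? ([16, 32, 64] : List Int) s).getD 0
  let prev := (PySem.List.pyGet? ([16, 16, 32] : List Int) s).getD 0
  let c_in := if k == (PySem.List.pyGet? starts s).getD 0 then prev else c_out
  let f := (c_in + c_out) * c_out * 9 * h * h
  f + (if c_in ≠ c_out then c_in * c_out * h * h else 0)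

def compute_layer_flops_py_alt (num_blocks : List Int) : List Int :=
  -- starts = [0]; for n in num_blocks[:3]: starts.append(starts[-1] + max(n, 0))
  let starts := (PySem.List.slice num_blocks none (some 3)).foldl
      (fun st n => st ++ [(PySem.List.pyGet? st (-1)).getD 0 + max n 0]) [0]
  -- starts[3] raises IndexError iff len(num_blocks) < 3 (outside Pre_)
  [3 * 16 * 9 * 32 * 32] ++
    (PySem.List.pyRange 0 ((PySem.List.pyGet? starts 3).getD 0) 1).map (pvCost starts)

-- ===== PRECONDITION & SPEC =====
-- Pre_: A indexes num_blocks[0], [1], [2]; shorter lists raise IndexError (B's starts[3] too).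
def Pre_compute_layer_flops_py (num_blocks : List Int) : Prop := 3 ≤ num_blocks.length
instance (num_blocks : List Int) : Decidable (Pre_compute_layer_flops_py num_blocks) := by unfold Pre_compute_layer_flops_py; infer_instance
def pvWitness_compute_layer_flops_py : List Int := [2, 2, 2]

def Spec_compute_layer_flops_py (num_blocks : List Int) (out : List Int) : Prop := out = compute_layer_flops_py_alt num_blocks
instance (num_blocks : List Int) (out : List Int) : Decidable (Spec_compute_layer_flops_py num_blocks out) := by unfold Spec_compute_layer_flops_py; infer_instance

-- ===== CLAIM (what is proved, stated in full; the proofs are below) =====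
def Claim_equal_compute_layer_flops_py : Prop := ∀ (num_blocks : List Int), Dom_compute_layer_flops_py num_blocks → Pre_compute_layer_flops_py num_blocks → Spec_compute_layer_flops_py num_blocks (compute_layer_flops_py num_blocks)

-- ===== LEMMAS AND PROOFS =====

-- Proof-side canonical form: stem, then per stage either nothing or first-cost :: replicated
-- rest-cost (stage 0 has prev = c_out = 16, so its first block costs the same as the rest).
def pvSeg (F R : Int) (m : Nat) : List Int :=
  if m = 0 then [] else F :: List.replicate (m - 1) R

def pvRef (a b c : Int) : List Int :=
  442368 :: (List.replicate (max a 0).toNat 4718592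
    ++ pvSeg 3670016 4718592 (max b 0).toNat
    ++ pvSeg 3670016 4718592 (max c 0).toNat)

-- ---- A side ----

-- A's rest-block iterations (indices ≥ 1) append a constant cost: replication
theorem pv_tail (prev c h : Int) (m : Nat) :
    ∀ (a : Int), 1 ≤ a → ∀ (acc : List Int),
    (PySem.List.pyRange a (a + m) 1).foldl (fun fl i =>
        let c_in := if i == 0 then prev else c
        let block_f := c_in * c * 9 * h * h + c * c * 9 * h * h
        let block_f := if c_in ≠ c then block_f + c_in * c * 1 * h * h else block_f
        fl ++ [block_f]) acc
      = acc ++ List.replicate m (2 * c * c * 9 * h * h) := by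
  induction m with
  | zero =>
    intro a _ acc
    rw [show a + (0 : Nat) = a by simp, PySem.List.pyRange_one_eq_nil le_rfl]
    simp
  | succ m ih =>
    intro a ha acc
    have hlt : a < a + (m + 1 : Nat) := by push_cast; omega
    rw [PySem.List.pyRange_one_cons hlt]
    simp only [List.foldl_cons]
    have ha0 : (a == 0) = false := by simp; omega
    simp only [ha0, Bool.false_eq_true, if_false, if_neg (by simp : ¬ (c ≠ c))]
    have harr : a + ((m : Nat) + 1 : Nat) = (a + 1) + (m : Nat) := by push_cast; ring
    rw [harr, ih (a + 1) (by omega)]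
    have hv : c * c * 9 * h * h + c * c * 9 * h * h = 2 * c * c * 9 * h * h := by ring
    rw [hv, List.replicate_succ]
    simp

-- A's inner loop over range(n): first block (i = 0) then replicated rest
theorem pv_loop (prev c h n : Int) (acc : List Int) :
    (PySem.List.pyRange 0 n 1).foldl (fun fl i =>
        let c_in := if i == 0 then prev else c
        let block_f := c_in * c * 9 * h * h + c * c * 9 * h * h
        let block_f := if c_in ≠ c then block_f + c_in * c * 1 * h * h else block_f
        fl ++ [block_f]) acc
      = acc ++ (if n ≤ 0 then [] else
          (prev * c * 9 * h * h + c * c * 9 * h * h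
            + (if prev ≠ c then prev * c * 1 * h * h else 0))
          :: List.replicate (n - 1).toNat (2 * c * c * 9 * h * h)) := by
  by_cases hn : n ≤ 0
  · rw [PySem.List.pyRange_one_eq_nil hn]
    simp [hn]
  · rw [PySem.List.pyRange_one_cons (by omega)]
    simp only [List.foldl_cons]
    rw [show (0 : Int) + 1 = 1 from by norm_num]
    rw [show PySem.List.pyRange 1 n 1 = PySem.List.pyRange 1 (1 + ((n - 1).toNat : Int)) 1
        from by congr 1; omega]
    rw [pv_tail prev c h (n - 1).toNat 1 le_rfl]
    have h00 : ((0 : Int) == 0) = true := rfl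
    simp only [h00, if_true, if_neg hn]
    by_cases hpc : prev ≠ c
    · simp only [if_pos hpc]; simp
    · simp only [if_neg hpc]; simp

theorem pvA_eq_ref (n0 n1 n2 : Int) (t : List Int) :
    compute_layer_flops_py (n0 :: n1 :: n2 :: t) = pvRef n0 n1 n2 := by
  simp only [compute_layer_flops_py, List.foldl_cons, List.foldl_nil]
  rw [pv_loop 16 16 32 n0, pv_loop 16 32 16 n1, pv_loop 32 64 8 n2]
  simp only [pvRef, pvSeg]
  norm_num
  have h0 : (if n0 ≤ 0 then ([] : List Int)
        else 4718592 :: List.replicate (n0.toNat - 1) 4718592)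
      = List.replicate (max n0 0).toNat 4718592 := by
    by_cases h : n0 ≤ 0
    · simp [h]
    · rw [if_neg h, show (max n0 0).toNat = (n0.toNat - 1) + 1 by omega, List.replicate_succ]
  have h1 : n1.toNat - 1 = (max n1 0).toNat - 1 := by omega
  have h2 : n2.toNat - 1 = (max n2 0).toNat - 1 := by omega
  rw [h0, h1, h2]

-- ---- B side ----

-- pvCost on the concrete starts list [0, A, A+B, A+B+C], stage by stage
theorem pvCost0 (A B C k : Int) (hB : 0 ≤ B) (hC : 0 ≤ C) (h0 : 0 ≤ k) (h1 : k < A) :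
    pvCost [0, A, A + B, A + B + C] k = 4718592 := by
  simp only [pvCost, show PySem.List.pyRange 0 3 1 = [0, 1, 2] from rfl]
  simp [PySem.List.pyGet?, PySem.List.pyIdx?, PySem.List.max?, h0, not_le.2 h1,
        show ¬ A + B ≤ k from by omega]

theorem pvCost1 (A B C k : Int) (hA : 0 ≤ A) (hB : 0 ≤ B) (hC : 0 ≤ C)
    (h1 : A ≤ k) (h2 : k < A + B) :
    pvCost [0, A, A + B, A + B + C] k = if k = A then 3670016 else 4718592 := by
  simp only [pvCost, show PySem.List.pyRange 0 3 1 = [0, 1, 2] from rfl]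
  simp [PySem.List.pyGet?, PySem.List.pyIdx?, PySem.List.max?, h1,
        show (0:Int) ≤ k from by omega, show ¬ A + B ≤ k from by omega]
  by_cases hk : k = A
  · simp [hk]
  · simp [hk]

theorem pvCost2 (A B C k : Int) (hA : 0 ≤ A) (hB : 0 ≤ B) (hC : 0 ≤ C)
    (h1 : A + B ≤ k) (h2 : k < A + B + C) :
    pvCost [0, A, A + B, A + B + C] k = if k = A + B then 3670016 else 4718592 := by
  simp only [pvCost, show PySem.List.pyRange 0 3 1 = [0, 1, 2] from rfl]
  simp [PySem.List.pyGet?, PySem.List.pyIdx?, PySem.List.max?, h1,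
        show (0:Int) ≤ k from by omega, show A ≤ k from by omega]
  by_cases hk : k = A + B
  · simp [hk]
  · simp [hk]

-- map of a range-constant function is a replicate
theorem pv_map_const (f : Int → Int) (R : Int) (m : Nat) :
    ∀ lo : Int, (∀ k, lo ≤ k → k < lo + m → f k = R) →
    (PySem.List.pyRange lo (lo + m) 1).map f = List.replicate m R := by
  induction m with
  | zero => intro lo _; rw [show lo + (0 : Nat) = lo by simp,
      PySem.List.pyRange_one_eq_nil le_rfl]; simp
  | succ m ih =>
    intro lo hf
    rw [PySem.List.pyRange_one_cons (by push_cast; omega)]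
    simp only [List.map_cons]
    rw [show lo + ((m : Nat) + 1 : Nat) = (lo + 1) + (m : Nat) from by push_cast; ring]
    rw [ih (lo + 1) (fun k hk1 hk2 => hf k (by omega) (by push_cast at hk2 ⊢; omega))]
    rw [hf lo le_rfl (by push_cast; omega), List.replicate_succ]

theorem pv_map_const' (f : Int → Int) (R : Int) (lo hi : Int) (m : Nat) (hm : hi = lo + m)
    (hf : ∀ k, lo ≤ k → k < hi → f k = R) :
    (PySem.List.pyRange lo hi 1).map f = List.replicate m R := by
  subst hm; exact pv_map_const f R m lo hf

-- map of a first/rest function over a range is a pvSeg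
theorem pv_map_seg (f : Int → Int) (F R lo hi : Int) (m : Nat) (hm : hi = lo + m)
    (hf : ∀ k, lo ≤ k → k < hi → f k = if k = lo then F else R) :
    (PySem.List.pyRange lo hi 1).map f = pvSeg F R m := by
  subst hm
  cases m with
  | zero => rw [show lo + ((0 : Nat) : Int) = lo by simp,
      PySem.List.pyRange_one_eq_nil le_rfl]; simp [pvSeg]
  | succ m =>
    rw [PySem.List.pyRange_one_cons (by push_cast; omega)]
    simp only [List.map_cons]
    rw [show lo + ((m : Nat) + 1 : Nat) = (lo + 1) + (m : Nat) from by push_cast; ring]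
    rw [pv_map_const f R m (lo + 1)
        (fun k hk1 hk2 => by rw [hf k (by omega) (by push_cast at hk2 ⊢; omega),
                               if_neg (by omega)])]
    rw [hf lo le_rfl (by push_cast; omega), if_pos rfl]
    simp [pvSeg]

theorem pvB_eq_ref (n0 n1 n2 : Int) (t : List Int) :
    compute_layer_flops_py_alt (n0 :: n1 :: n2 :: t) = pvRef n0 n1 n2 := by
  have hsl : PySem.List.slice (n0 :: n1 :: n2 :: t) none (some 3) = [n0, n1, n2] := by
    simp [PySem.List.slice_to]
  have hs : (PySem.List.slice (n0 :: n1 :: n2 :: t) none (some 3)).foldl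
      (fun st n => st ++ [(PySem.List.pyGet? st (-1)).getD 0 + max n 0]) [0]
      = [0, max n0 0, max n0 0 + max n1 0, max n0 0 + max n1 0 + max n2 0] := by
    rw [hsl]
    simp [PySem.List.pyGet?_neg_one]
  simp only [compute_layer_flops_py_alt, hs]
  have h3 : (PySem.List.pyGet? [0, max n0 0, max n0 0 + max n1 0,
      max n0 0 + max n1 0 + max n2 0] 3).getD 0
      = max n0 0 + max n1 0 + max n2 0 := by
    simp [PySem.List.pyGet?, PySem.List.pyIdx?]
  rw [h3]
  have hA : (0:Int) ≤ max n0 0 := le_max_right _ _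
  have hB : (0:Int) ≤ max n1 0 := le_max_right _ _
  have hC : (0:Int) ≤ max n2 0 := le_max_right _ _
  rw [PySem.List.pyRange_one_append 0 (max n0 0) _ hA (by omega),
      PySem.List.pyRange_one_append (max n0 0) (max n0 0 + max n1 0) _ (by omega) (by omega),
      List.map_append, List.map_append]
  rw [pv_map_const' _ 4718592 0 (max n0 0) (max n0 0).toNat (by omega)
        (fun k hk1 hk2 => pvCost0 _ _ _ _ hB hC hk1 hk2),
      pv_map_seg _ 3670016 4718592 (max n0 0) (max n0 0 + max n1 0) (max n1 0).toNat
        (by omega)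
        (fun k hk1 hk2 => pvCost1 _ _ _ _ hA hB hC hk1 hk2),
      pv_map_seg _ 3670016 4718592 (max n0 0 + max n1 0)
        (max n0 0 + max n1 0 + max n2 0) (max n2 0).toNat (by omega)
        (fun k hk1 hk2 => pvCost2 _ _ _ _ hA hB hC hk1 hk2)]
  simp [pvRef]

-- ===== VERDICT (by name: the statement is the Claim_ definition above) =====
theorem compute_layer_flops_py_spec : Claim_equal_compute_layer_flops_py := by
  intro nb _ hpre
  unfold Spec_compute_layer_flops_py
  match nb, hpre with
  | n0 :: n1 :: n2 :: t, _ => rw [pvA_eq_ref, pvB_eq_ref]
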